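-- pv_equiv track=rewrite | github.com/ArioMoniri/CAPVIC | src/variant_mcp/classification/amp_asco_cap.py | _parse_amp_level
-- ===== SOURCE A (Python) =====
-- def _parse_amp_level(amp_str: str) -> tuple[str | None, str | None]:
--     """Parse AMP level string like 'TIERI-LEVELA' into (tier, level)."""
--     amp_str = amp_str.upper().replace("_", "").replace("-", "").replace(" ", "")
--     # Check longest tier strings first to avoid prefix collision
--     # (e.g., "TIERI" matching before "TIERII")
--     for tier_val in ("IV", "III", "II", "I"):
--         for level_val in ("A", "B", "C", "D"):
--             if f"TIER{tier_val}" in amp_str and f"LEVEL{level_val}" in amp_str: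
--                 return tier_val, level_val
--         if f"TIER{tier_val}" in amp_str:
--             return tier_val, None
--     return None, None
-- ===== SOURCE B (Python) =====
-- def _parse_amp_level(amp_str: str) -> tuple[str | None, str | None]:
--     """Parse AMP level string like 'TIERI-LEVELA' into (tier, level)."""
--     s = amp_str.upper().replace("_", "").replace("-", "").replace(" ", "")
--     bt = _best_tagged(s, "TIER", ("IV", "III", "II", "I"))
--     if bt is None:
--         return None, None
--     bl = _best_tagged(s, "LEVEL", ("A", "B", "C", "D"))
--     return bt[1], (None if bl is None else bl[1])
--
--
-- def _best_tagged(s, kw, tokens):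
--     # One left-to-right scan over the positions of s: at every occurrence of
--     # the keyword, rank the token that immediately follows it (first match in
--     # priority order) and keep the best (lowest) rank seen in the string.
--     best = None
--     for i in range(len(s)):
--         if s.startswith(kw, i):
--             for r, t in enumerate(tokens):
--                 if s.startswith(t, i + len(kw)):
--                     if best is None or r < best[0]:
--                         best = (r, t)
--                     break
--     return best
-- ===== Notes on version B (the rewrite author's own statement) =====
-- stated objective: alternative
-- what changed: Replaces A's fixed 4x4 grid of whole-string substring-membership tests by a single positional scan of the normalized string that, at each occurrence of a keyword, ranks the token immediately following it and keeps the minimum rank seen, returning the token of that best rank.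
import Mathlib
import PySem

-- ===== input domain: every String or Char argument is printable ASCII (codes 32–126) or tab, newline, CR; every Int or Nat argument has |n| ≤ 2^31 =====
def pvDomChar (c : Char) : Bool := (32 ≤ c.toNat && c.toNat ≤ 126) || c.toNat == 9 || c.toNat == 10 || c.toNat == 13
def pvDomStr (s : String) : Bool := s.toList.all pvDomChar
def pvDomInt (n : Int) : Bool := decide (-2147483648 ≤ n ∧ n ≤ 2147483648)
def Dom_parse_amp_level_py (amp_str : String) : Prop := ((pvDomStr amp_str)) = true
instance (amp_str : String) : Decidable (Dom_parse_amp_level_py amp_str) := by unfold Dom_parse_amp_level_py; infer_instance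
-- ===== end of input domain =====

-- B replaces A's fixed grid of whole-string substring tests by one positional scan that
-- ranks the token after each 'TIER'/'LEVEL' occurrence and keeps the minimum rank; objective: alternative.

-- ===== PORT A =====
-- normalization shared by both Pythons: amp_str.upper().replace("_","").replace("-","").replace(" ","")
def pvNormalize (amp_str : String) : String :=
  PySem.Str.replace (PySem.Str.replace (PySem.Str.replace (PySem.Str.upper amp_str) "_" "") "-" "") " " ""

-- inner 'for level_val in ("A","B","C","D")' loop: some result = an early return
def pvLevelLoop (s t : String) : List String → Option (Option String × Option String)
  | [] => none
  | l :: ls =>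
    if PySem.Str.isIn ("TIER" ++ t) s && PySem.Str.isIn ("LEVEL" ++ l) s then
      some (some t, some l)
    else pvLevelLoop s t ls

-- outer 'for tier_val in ("IV", "III", "II", "I")' loop
def pvTierLoop (s : String) : List String → Option String × Option String
  | [] => (none, none)
  | t :: ts =>
    match pvLevelLoop s t ["A", "B", "C", "D"] with
    | some r => r
    | none =>
      if PySem.Str.isIn ("TIER" ++ t) s then (some t, none)
      else pvTierLoop s ts

def parse_amp_level_py (amp_str : String) : Option String × Option String :=
  pvTierLoop (pvNormalize amp_str) ["IV", "III", "II", "I"]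

-- ===== PORT B =====
-- inner 'for r, t in enumerate(tokens): if s.startswith(t, j): … break' loop of _best_tagged
def pvFirstTok (cs : List Char) (j : Nat) : List String → Nat → Option (Nat × String)
  | [], _ => none
  | t :: ts, r =>
    if t.toList.isPrefixOf (cs.drop j) then some (r, t) else pvFirstTok cs j ts (r + 1)

-- 'if best is None or r < best[0]: best = (r, t)'
def pvKeepBest (best : Option (Nat × String)) (cand : Option (Nat × String)) : Option (Nat × String) :=
  match cand with
  | none => best
  | some (r, t) =>
    match best with
    | none => some (r, t)
    | some (b, bt) => if r < b then some (r, t) else some (b, bt)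

-- body of the 'for i in range(len(s))' scan of _best_tagged
def pvStep (cs kw : List Char) (ts : List String) (i : Nat) : Option (Nat × String) :=
  if kw.isPrefixOf (cs.drop i) then pvFirstTok cs (i + kw.length) ts 0 else none

-- _best_tagged(s, kw, tokens)
def pvBest (cs kw : List Char) (ts : List String) : Option (Nat × String) :=
  (List.range cs.length).foldl (fun best i => pvKeepBest best (pvStep cs kw ts i)) none

def parse_amp_level_py_alt (amp_str : String) : Option String × Option String :=
  let cs := (pvNormalize amp_str).toList
  match pvBest cs "TIER".toList ["IV", "III", "II", "I"] with
  | none => (none, none)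
  | some bt =>
    (some bt.2, ((pvBest cs "LEVEL".toList ["A", "B", "C", "D"]).map Prod.snd))

-- ===== PRECONDITION & SPEC =====
def Spec_parse_amp_level_py (amp_str : String) (out : Option String × Option String) : Prop := out = parse_amp_level_py_alt amp_str
instance (amp_str : String) (out : Option String × Option String) : Decidable (Spec_parse_amp_level_py amp_str out) := by unfold Spec_parse_amp_level_py; infer_instance

-- ===== CLAIM (what is proved, stated in full; the proofs are below) =====
def Claim_equal_parse_amp_level_py : Prop := ∀ (amp_str : String), Dom_parse_amp_level_py amp_str → Spec_parse_amp_level_py amp_str (parse_amp_level_py amp_str)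


-- ===== LEMMAS AND PROOFS =====

-- A's loops equal a priority-find over the eight substring tests
theorem pv_core (s : String) :
    pvTierLoop s ["IV", "III", "II", "I"] =
      (match ["IV", "III", "II", "I"].find? (fun t => PySem.Str.isIn ("TIER" ++ t) s) with
       | none => (none, none)
       | some t => (some t, ["A", "B", "C", "D"].find? (fun l => PySem.Str.isIn ("LEVEL" ++ l) s))) := by
  simp only [pvTierLoop, pvLevelLoop, List.find?]
  cases PySem.Str.isIn ("TIER" ++ "IV") s <;>
  cases PySem.Str.isIn ("TIER" ++ "III") s <;>
  cases PySem.Str.isIn ("TIER" ++ "II") s <;>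
  cases PySem.Str.isIn ("TIER" ++ "I") s <;>
  cases PySem.Str.isIn ("LEVEL" ++ "A") s <;>
  cases PySem.Str.isIn ("LEVEL" ++ "B") s <;>
  cases PySem.Str.isIn ("LEVEL" ++ "C") s <;>
  cases PySem.Str.isIn ("LEVEL" ++ "D") s <;>
  rfl

-- pvKeepBest characterizations
theorem pvKB_none (b o : Option (Nat × String)) :
    pvKeepBest b o = none ↔ b = none ∧ o = none := by
  cases o with
  | none => simp [pvKeepBest]
  | some p =>
    obtain ⟨r, t⟩ := p
    cases b with
    | none => simp [pvKeepBest]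
    | some q => obtain ⟨br, bt⟩ := q; simp [pvKeepBest]; split <;> simp

theorem pvKB_some (b o p : Option (Nat × String)) :
    pvKeepBest b o = p → p = none ∨ p = b ∨ p = o := by
  cases o with
  | none => intro h; right; left; exact h.symm
  | some q =>
    obtain ⟨r, t⟩ := q
    cases b with
    | none => intro h; right; right; exact h.symm
    | some q' =>
      obtain ⟨br, bt⟩ := q'
      simp only [pvKeepBest]
      split <;> (intro h; subst h)
      · right; right; rfl
      · right; left; rfl

theorem pvKB_le_b (b o : Option (Nat × String)) (p q : Nat × String)
    (h : pvKeepBest b o = some p) (hb : b = some q) : p.1 ≤ q.1 := by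
  subst hb
  cases o with
  | none => simp [pvKeepBest] at h; subst h; exact le_refl _
  | some c =>
    obtain ⟨r, t⟩ := c
    obtain ⟨br, bt⟩ := q
    simp only [pvKeepBest] at h
    split at h <;> cases h <;> simp <;> omega

theorem pvKB_le_o (b o : Option (Nat × String)) (p q : Nat × String)
    (h : pvKeepBest b o = some p) (ho : o = some q) : p.1 ≤ q.1 := by
  subst ho
  obtain ⟨r, t⟩ := q
  cases b with
  | none => simp [pvKeepBest] at h; subst h; exact le_refl _
  | some q' =>
    obtain ⟨br, bt⟩ := q'
    simp only [pvKeepBest] at h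
    split at h <;> cases h <;> simp <;> omega

-- the min-accumulating scan: fold characterizations
theorem pvFold_none (g : Nat → Option (Nat × String)) (n : Nat) :
    ((List.range n).foldl (fun b i => pvKeepBest b (g i)) none = none) ↔ ∀ i < n, g i = none := by
  induction n with
  | zero => simp
  | succ n ih =>
    rw [List.range_succ, List.foldl_append]
    simp only [List.foldl_cons, List.foldl_nil]
    rw [pvKB_none, ih]
    constructor
    · rintro ⟨h1, h2⟩ i hi
      rcases Nat.lt_succ_iff_lt_or_eq.mp hi with h | h
      · exact h1 i h
      · subst h; exact h2
    · intro h
      exact ⟨fun i hi => h i (Nat.lt_succ_of_lt hi), h n (Nat.lt_succ_self n)⟩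

theorem pvFold_mem (g : Nat → Option (Nat × String)) (n : Nat) (p : Nat × String)
    (h : (List.range n).foldl (fun b i => pvKeepBest b (g i)) none = some p) :
    ∃ i < n, g i = some p := by
  induction n with
  | zero => simp at h
  | succ n ih =>
    rw [List.range_succ, List.foldl_append] at h
    simp only [List.foldl_cons, List.foldl_nil] at h
    rcases pvKB_some _ _ _ h with h' | h' | h'
    · exact absurd h'.symm (by simp)
    · obtain ⟨i, hi, hg⟩ := ih h'.symm
      exact ⟨i, Nat.lt_succ_of_lt hi, hg⟩
    · exact ⟨n, Nat.lt_succ_self n, h'.symm⟩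

theorem pvFold_min (g : Nat → Option (Nat × String)) (n : Nat) (p : Nat × String)
    (h : (List.range n).foldl (fun b i => pvKeepBest b (g i)) none = some p) :
    ∀ i < n, ∀ q : Nat × String, g i = some q → p.1 ≤ q.1 := by
  induction n generalizing p with
  | zero => intro i hi; omega
  | succ n ih =>
    rw [List.range_succ, List.foldl_append] at h
    simp only [List.foldl_cons, List.foldl_nil] at h
    intro i hi q hq
    rcases Nat.lt_succ_iff_lt_or_eq.mp hi with h' | h'
    · cases hb : (List.range n).foldl (fun b i => pvKeepBest b (g i)) none with
      | none => exact absurd hq (by simp [(pvFold_none g n).mp hb i h'])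
      | some p' =>
        rw [hb] at h
        exact le_trans (pvKB_le_b _ _ _ _ h rfl) (ih p' hb i h' q hq)
    · subst h'
      exact pvKB_le_o _ _ _ _ h hq

-- pvFirstTok characterizations
theorem pvFT_none (cs : List Char) (j : Nat) (ts : List String) (r0 : Nat) :
    pvFirstTok cs j ts r0 = none ↔ ∀ t ∈ ts, ¬ (t.toList <+: cs.drop j) := by
  induction ts generalizing r0 with
  | nil => simp [pvFirstTok]
  | cons t rest ih =>
    simp only [pvFirstTok]
    cases hp : t.toList.isPrefixOf (cs.drop j) with
    | true =>
      rw [if_pos (by simp)]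
      constructor
      · intro h; exact absurd h (by simp)
      · intro h
        exact absurd (List.isPrefixOf_iff_prefix.mp hp) (h t (by simp))
    | false =>
      rw [if_neg (by simp)]
      rw [ih]
      constructor
      · intro h t' ht'
        rcases List.mem_cons.mp ht' with h' | h'
        · subst h'; intro hc
          exact absurd (List.isPrefixOf_iff_prefix.mpr hc) (by simp [hp])
        · exact h t' h'
      · intro h t' ht'
        exact h t' (List.mem_cons_of_mem _ ht')

theorem pvFT_some (cs : List Char) (j : Nat) (ts : List String) (r0 r : Nat) (t : String)
    (h : pvFirstTok cs j ts r0 = some (r, t)) :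
    r0 ≤ r ∧ ts[r - r0]? = some t ∧ t.toList <+: cs.drop j := by
  induction ts generalizing r0 with
  | nil => simp [pvFirstTok] at h
  | cons t' rest ih =>
    simp only [pvFirstTok] at h
    cases hp : t'.toList.isPrefixOf (cs.drop j) with
    | true =>
      rw [if_pos (by simp [hp])] at h
      obtain ⟨h1, h2⟩ := by simpa using h
      subst h1; subst h2
      exact ⟨le_refl _, by simp, List.isPrefixOf_iff_prefix.mp hp⟩
    | false =>
      rw [if_neg (by simp [hp])] at h
      obtain ⟨h1, h2, h3⟩ := ih (r0 + 1) h
      refine ⟨by omega, ?_, h3⟩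
      have : r - r0 = (r - (r0 + 1)) + 1 := by omega
      rw [this]
      simpa using h2

theorem pvFT_hit (cs : List Char) (j : Nat) (ts : List String) (r0 k : Nat) (t0 : String)
    (hk : ts[k]? = some t0) (hp : t0.toList <+: cs.drop j) :
    ∃ r t, pvFirstTok cs j ts r0 = some (r, t) ∧ r ≤ r0 + k := by
  induction ts generalizing r0 k with
  | nil => simp at hk
  | cons t' rest ih =>
    simp only [pvFirstTok]
    cases hpre : t'.toList.isPrefixOf (cs.drop j) with
    | true =>
      exact ⟨r0, t', by rw [if_pos (by simp)], by omega⟩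
    | false =>
      rw [if_neg (by simp)]
      cases k with
      | zero =>
        simp at hk; subst hk
        exact absurd (List.isPrefixOf_iff_prefix.mpr hp) (by simp [hpre])
      | succ k' =>
        obtain ⟨r, t, h1, h2⟩ := ih (r0 + 1) k' (by simpa using hk)
        exact ⟨r, t, h1, by omega⟩

-- prefix of an append splits at the keyword boundary
theorem pvPrefix_split (kw u v : List Char) :
    (kw ++ u) <+: v ↔ kw <+: v ∧ u <+: v.drop kw.length := by
  constructor
  · rintro ⟨w, hw⟩
    refine ⟨⟨u ++ w, by rw [← hw]; simp⟩, ?_⟩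
    rw [← hw, List.append_assoc, List.drop_left]
    exact ⟨w, rfl⟩
  · rintro ⟨⟨v1, hv1⟩, hu⟩
    rw [← hv1, List.drop_left] at hu
    obtain ⟨w, hw⟩ := hu
    exact ⟨w, by rw [← hv1, ← hw]; simp⟩

-- 'kw ++ u' is a substring iff kw occurs at some position i < |cs| with u right after it
theorem pvIsIn_iff (cs kw u : List Char) (hkw : kw ≠ []) :
    PySem.Chars.isIn (kw ++ u) cs = true ↔
      ∃ i < cs.length, kw <+: cs.drop i ∧ u <+: cs.drop (i + kw.length) := by
  rw [← PySem.Chars.exists_prefix_drop_iff_isIn]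
  constructor
  · rintro ⟨j, hj⟩
    have hlt : j < cs.length := by
      by_contra hge
      rw [List.drop_eq_nil_of_le (by omega)] at hj
      have := List.prefix_nil.mp hj
      simp [hkw] at this
    rw [pvPrefix_split, List.drop_drop] at hj
    exact ⟨j, hlt, hj.1, hj.2⟩
  · rintro ⟨i, _, h1, h2⟩
    refine ⟨i, (pvPrefix_split kw u _).mpr ⟨h1, ?_⟩⟩
    rw [List.drop_drop]
    exact h2

-- pvStep characterizations
theorem pvStep_some (cs kw : List Char) (ts : List String) (i r : Nat) (t : String)
    (h : pvStep cs kw ts i = some (r, t)) :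
    kw <+: cs.drop i ∧ ts[r]? = some t ∧ t.toList <+: cs.drop (i + kw.length) := by
  unfold pvStep at h
  cases hp : kw.isPrefixOf (cs.drop i) with
  | false => rw [if_neg (by simp [hp])] at h; simp at h
  | true =>
    rw [if_pos (by simp [hp])] at h
    obtain ⟨_, h2, h3⟩ := pvFT_some cs _ ts 0 r t h
    exact ⟨List.isPrefixOf_iff_prefix.mp hp, by simpa using h2, h3⟩

theorem pvStep_hit (cs kw : List Char) (ts : List String) (i k : Nat) (t0 : String)
    (hkw : kw <+: cs.drop i) (hk : ts[k]? = some t0)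
    (hp : t0.toList <+: cs.drop (i + kw.length)) :
    ∃ r t, pvStep cs kw ts i = some (r, t) ∧ r ≤ k := by
  obtain ⟨r, t, h1, h2⟩ := pvFT_hit cs (i + kw.length) ts 0 k t0 hk hp
  exact ⟨r, t, by unfold pvStep; rw [if_pos (List.isPrefixOf_iff_prefix.mpr hkw)]; exact h1, by omega⟩

-- the scan returns exactly the first token (in priority order) occurring after the keyword
theorem pvBest_eq_find (cs kw : List Char) (hkw : kw ≠ []) (ts : List String) :
    (pvBest cs kw ts).map Prod.snd
      = ts.find? (fun t => PySem.Chars.isIn (kw ++ t.toList) cs) := by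
  cases hf : ts.find? (fun t => PySem.Chars.isIn (kw ++ t.toList) cs) with
  | none =>
    have hall := List.find?_eq_none.mp hf
    have hbest : pvBest cs kw ts = none := by
      unfold pvBest
      rw [pvFold_none]
      intro i hi
      unfold pvStep
      cases hp : kw.isPrefixOf (cs.drop i) with
      | false => rw [if_neg (by simp)]
      | true =>
        rw [if_pos (by simp)]
        rw [pvFT_none]
        intro t ht hpre
        exact absurd ((pvIsIn_iff cs kw t.toList hkw).mpr
          ⟨i, hi, List.isPrefixOf_iff_prefix.mp hp, hpre⟩) (by simpa using hall t ht)
    rw [hbest]; rfl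
  | some t0 =>
    obtain ⟨hq0, r0, hr0lt, hr0, hmin⟩ := List.find?_eq_some_iff_getElem.mp hf
    obtain ⟨i, hilt, hkpre, htpre⟩ := (pvIsIn_iff cs kw t0.toList hkw).mp hq0
    obtain ⟨r', t', hstep, hr'le⟩ :=
      pvStep_hit cs kw ts i r0 t0 hkpre (by rw [List.getElem?_eq_some_iff]; exact ⟨hr0lt, hr0⟩) htpre
    cases hb : pvBest cs kw ts with
    | none =>
      unfold pvBest at hb
      exact absurd hstep (by simp [(pvFold_none _ _).mp hb i hilt])
    | some p =>
      obtain ⟨m, tm⟩ := p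
      obtain ⟨i2, hi2, hstep2⟩ := pvFold_mem _ _ _ hb
      obtain ⟨hk2, hm2, hp2⟩ := pvStep_some cs kw ts i2 m tm hstep2
      obtain ⟨hmlt, hmval⟩ := List.getElem?_eq_some_iff.mp hm2
      have hqm : PySem.Chars.isIn (kw ++ tm.toList) cs = true :=
        (pvIsIn_iff cs kw tm.toList hkw).mpr ⟨i2, hi2, hk2, hp2⟩
      have hge : r0 ≤ m := by
        by_contra hlt
        have := hmin m (by omega)
        rw [hmval] at this
        simp [hqm] at this
      have hle : m ≤ r' := pvFold_min _ _ _ hb i hilt (r', t') hstep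
      have hm : m = r0 := by omega
      subst hm
      rw [hr0] at hmval
      simp [hmval]

theorem pvFind_congr_tier (s : String) :
    ["IV", "III", "II", "I"].find? (fun t => PySem.Str.isIn ("TIER" ++ t) s)
      = (pvBest s.toList "TIER".toList ["IV", "III", "II", "I"]).map Prod.snd := by
  have hp : (fun t => PySem.Str.isIn ("TIER" ++ t) s)
      = (fun t : String => PySem.Chars.isIn ("TIER".toList ++ t.toList) s.toList) := by
    funext t; simp
  rw [hp]
  exact (pvBest_eq_find s.toList "TIER".toList (by decide) _).symm

theorem pvFind_congr_level (s : String) :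
    ["A", "B", "C", "D"].find? (fun l => PySem.Str.isIn ("LEVEL" ++ l) s)
      = (pvBest s.toList "LEVEL".toList ["A", "B", "C", "D"]).map Prod.snd := by
  have hp : (fun l => PySem.Str.isIn ("LEVEL" ++ l) s)
      = (fun l : String => PySem.Chars.isIn ("LEVEL".toList ++ l.toList) s.toList) := by
    funext l; simp
  rw [hp]
  exact (pvBest_eq_find s.toList "LEVEL".toList (by decide) _).symm

-- ===== VERDICT (by name: the statement is the Claim_ definition above) =====
theorem parse_amp_level_py_spec : Claim_equal_parse_amp_level_py := by
  intro amp_str _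
  unfold Spec_parse_amp_level_py parse_amp_level_py parse_amp_level_py_alt
  rw [pv_core, pvFind_congr_tier, pvFind_congr_level]
  simp only [show ("TIER".toList : List Char) = ['T', 'I', 'E', 'R'] from rfl,
    show ("LEVEL".toList : List Char) = ['L', 'E', 'V', 'E', 'L'] from rfl]
  cases pvBest (pvNormalize amp_str).toList ['T', 'I', 'E', 'R'] ["IV", "III", "II", "I"] <;> simp
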